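-- pv_equiv track=rewrite | github.com/skaurl/programmers | Level 1/모의고사.py | solution
-- ===== SOURCE A (Python) =====
-- def solution(answers):
--     sum_1 = 0
--     sum_2 = 0
--     sum_3 = 0
--
--     p_1 = [1, 2, 3, 4, 5]
--     p_2 = [2, 1, 2, 3, 2, 4, 2, 5]
--     p_3 = [3, 3, 1, 1, 2, 2, 4, 4, 5, 5]
--
--     for i in range(len(answers)):
--         if p_1[i%5] == answers[i%len(answers)]:
--             sum_1 += 1
--
--     for i in range(len(answers)):
--         if p_2[i%8] == answers[i%len(answers)]:
--             sum_2 += 1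
--
--     for i in range(len(answers)):
--         if p_3[i%10] == answers[i%len(answers)]:
--             sum_3 += 1
--
--     if sum_1 == sum_2 == sum_3:
--         return [1,2,3]
--     elif sum_1 > sum_2 and  sum_1 > sum_3:
--         return [1]
--     elif sum_2 > sum_1 and  sum_2 > sum_3:
--         return [2]
--     elif sum_3 > sum_2 and  sum_3 > sum_1:
--         return [3]
--     elif sum_1 == sum_2 and  sum_1 > sum_3:
--         return [1,2]
--     elif sum_2 > sum_1 and  sum_2 == sum_3:
--         return [2,3]
--     elif sum_3 > sum_2 and  sum_3 == sum_1:
--         return [1,3]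
-- ===== SOURCE B (Python) =====
-- def solution(answers):
--     patterns = [[1, 2, 3, 4, 5],
--                 [2, 1, 2, 3, 2, 4, 2, 5],
--                 [3, 3, 1, 1, 2, 2, 4, 4, 5, 5]]
--     # All three patterns repeat with a period dividing 40, so an answer's
--     # contribution depends only on (its index mod 40, its value).  Build that
--     # histogram in one pass, then read each score off the 40-entry table.
--     tally = {}
--     for i, a in enumerate(answers):
--         k = (i % 40, a)
--         tally[k] = tally.get(k, 0) + 1
--     scores = [sum(tally.get((r, p[r % len(p)]), 0) for r in range(40))
--               for p in patterns]
--     m = max(scores)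
--     return [k + 1 for k in range(3) if scores[k] == m]
-- ===== Notes on version B (the rewrite author's own statement) =====
-- stated objective: alternative
-- what changed: Instead of A's three per-pattern counting loops plus a 7-branch if/elif tie chain, B makes one pass building a histogram keyed by (index mod 40, answer) -- 40 is a common period of all three patterns -- reads each score off the 40-entry table without re-scanning the answers per pattern, and returns the argmax indices via max plus a filter.
import Mathlib
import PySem

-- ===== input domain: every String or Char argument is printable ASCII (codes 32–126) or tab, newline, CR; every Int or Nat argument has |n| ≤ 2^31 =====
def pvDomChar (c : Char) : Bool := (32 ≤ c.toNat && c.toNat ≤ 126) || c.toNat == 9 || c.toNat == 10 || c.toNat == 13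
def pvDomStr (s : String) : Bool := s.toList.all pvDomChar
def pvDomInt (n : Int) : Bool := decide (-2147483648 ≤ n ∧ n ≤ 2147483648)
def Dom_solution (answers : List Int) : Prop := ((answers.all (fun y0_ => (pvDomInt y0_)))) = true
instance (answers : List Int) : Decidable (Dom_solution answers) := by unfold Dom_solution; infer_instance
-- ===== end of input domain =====

-- B replaces A's three per-pattern counting loops and 7-branch if/elif tie chain by a single pass
-- building a histogram keyed by (index mod 40, answer) — 40 is a common period of all three
-- patterns — then reads each score off the 40-entry table and returns the argmax indices
-- (objective: alternative). Both programs are total; equivalence is proved on all of Dom_solution.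

-- ===== PORT A =====
-- A's loops 'for i in range(len(answers))': pyGetD (default 0) is exact here since the indices
-- i%5 / i%8 / i%10 / i%len(answers) are always in range while the loop runs.
def solution (answers : List Int) : List Int :=
  let p1 : List Int := [1, 2, 3, 4, 5]
  let p2 : List Int := [2, 1, 2, 3, 2, 4, 2, 5]
  let p3 : List Int := [3, 3, 1, 1, 2, 2, 4, 4, 5, 5]
  let n := PySem.List.len answers
  let sum1 := (PySem.List.pyRange 0 n 1).foldl
    (fun s i => if PySem.List.pyGetD p1 (PySem.Int.mod i 5) 0
                   = PySem.List.pyGetD answers (PySem.Int.mod i n) 0 then s + 1 else s) (0 : Int)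
  let sum2 := (PySem.List.pyRange 0 n 1).foldl
    (fun s i => if PySem.List.pyGetD p2 (PySem.Int.mod i 8) 0
                   = PySem.List.pyGetD answers (PySem.Int.mod i n) 0 then s + 1 else s) (0 : Int)
  let sum3 := (PySem.List.pyRange 0 n 1).foldl
    (fun s i => if PySem.List.pyGetD p3 (PySem.Int.mod i 10) 0
                   = PySem.List.pyGetD answers (PySem.Int.mod i n) 0 then s + 1 else s) (0 : Int)
  if sum1 = sum2 ∧ sum2 = sum3 then [1, 2, 3]
  else if sum1 > sum2 ∧ sum1 > sum3 then [1]
  else if sum2 > sum1 ∧ sum2 > sum3 then [2]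
  else if sum3 > sum2 ∧ sum3 > sum1 then [3]
  else if sum1 = sum2 ∧ sum1 > sum3 then [1, 2]
  else if sum2 > sum1 ∧ sum2 = sum3 then [2, 3]
  else if sum3 > sum2 ∧ sum3 = sum1 then [1, 3]
  else []  -- unreachable: the chain above is exhaustive (Python falls through to None here, never reached)

-- ===== PORT B =====
def pvPatterns : List (List Int) := [[1, 2, 3, 4, 5], [2, 1, 2, 3, 2, 4, 2, 5], [3, 3, 1, 1, 2, 2, 4, 4, 5, 5]]

-- Source B's 'k = (i % 40, a)'
def pvKey (ia : Int × Int) : Int × Int := (PySem.Int.mod ia.1 40, ia.2)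

-- Source B's histogram loop 'for i, a in enumerate(answers): tally[k] = tally.get(k, 0) + 1'
def pvTally (answers : List Int) : PySem.Dict (Int × Int) Int :=
  (PySem.List.enumerate answers 0).foldl
    (fun d ia => d.insert (pvKey ia) (d.getD (pvKey ia) 0 + 1)) PySem.Dict.empty

-- Source B's 'sum(tally.get((r, p[r % len(p)]), 0) for r in range(40))'
def pvScore (t : PySem.Dict (Int × Int) Int) (p : List Int) : Int :=
  (PySem.List.pyRange 0 40 1).foldl
    (fun s r => s + t.getD (r, PySem.List.pyGetD p (PySem.Int.mod r (PySem.List.len p)) 0) 0) 0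

def solution_alt (answers : List Int) : List Int :=
  let tally := pvTally answers
  let scores := pvPatterns.map (pvScore tally)
  -- max(scores): scores always has 3 elements, so max? is some and .getD 0 is exact
  let m := (PySem.List.max? scores (fun x => x)).getD 0
  (PySem.List.pyRange 0 3 1).foldl
    (fun acc k => if PySem.List.pyGetD scores k 0 = m then acc ++ [k + 1] else acc) []

-- ===== PRECONDITION & SPEC =====
def Spec_solution (answers : List Int) (out : List Int) : Prop := out = solution_alt answers
instance (answers : List Int) (out : List Int) : Decidable (Spec_solution answers out) := by unfold Spec_solution; infer_instance

-- ===== CLAIM (what is proved, stated in full; the proofs are below) =====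
def Claim_equal_solution : Prop := ∀ (answers : List Int), Dom_solution answers → Spec_solution answers (solution answers)

-- ===== LEMMAS AND PROOFS =====

-- number of positions of l at which pattern p, read cyclically starting at offset i, matches l
def cnt (p : List Int) : Nat → List Int → Int
  | _, [] => 0
  | i, a :: t => (if p.getD (i % p.length) 0 = a then (1 : Int) else 0) + cnt p (i + 1) t

lemma foldl_range_cnt (p : List Int) (l : List Int) : ∀ (i0 : Nat) (s0 : Int),
    (List.range l.length).foldl
      (fun s j => if p.getD ((i0 + j) % p.length) 0 = l.getD j 0 then s + 1 else s) s0
    = s0 + cnt p i0 l := by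
  induction l with
  | nil => intro i0 s0; simp [cnt]
  | cons a t ih =>
    intro i0 s0
    simp only [List.length_cons, List.range_succ_eq_map, List.foldl_cons, List.foldl_map,
      Nat.add_zero, List.getD_cons_zero, List.getD_cons_succ, Nat.succ_eq_add_one]
    have hfun : (fun (s : Int) (j : Nat) =>
        if p.getD ((i0 + (j + 1)) % p.length) 0 = t.getD j 0 then s + 1 else s)
        = (fun (s : Int) (j : Nat) =>
        if p.getD ((i0 + 1 + j) % p.length) 0 = t.getD j 0 then s + 1 else s) := by
      funext s j
      rw [show i0 + (j + 1) = i0 + 1 + j by omega]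
    rw [hfun, ih (i0 + 1)]
    simp only [cnt, List.getD_eq_getElem?_getD]
    by_cases h : (p[i0 % p.length]?).getD 0 = a
    · simp [h]; ring
    · simp [h]

-- A's counting loop for pattern p (with L the literal modulus A writes) computes cnt p 0
lemma A_count (p : List Int) (L : Int) (hL : (p.length : Int) = L) (answers : List Int) :
    (PySem.List.pyRange 0 (PySem.List.len answers) 1).foldl
      (fun s i => if PySem.List.pyGetD p (PySem.Int.mod i L) 0
                     = PySem.List.pyGetD answers (PySem.Int.mod i (PySem.List.len answers)) 0
                  then s + 1 else s) (0 : Int)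
    = cnt p 0 answers := by
  subst hL
  rw [PySem.List.pyRange_one]
  simp only [Int.sub_zero, PySem.List.len_eq, Int.toNat_natCast, List.foldl_map, Int.zero_add,
    PySem.Int.mod_natCast, PySem.List.pyGetD_natCast]
  have hc := PySem.List.foldl_congr_mem (l := List.range answers.length) (init := (0 : Int))
    (f := fun (s : Int) (j : Nat) =>
      if p.getD (j % p.length) 0 = answers.getD (j % answers.length) 0 then s + 1 else s)
    (g := fun (s : Int) (j : Nat) =>
      if p.getD (j % p.length) 0 = answers.getD j 0 then s + 1 else s)
    (by intro acc j hj; rw [List.mem_range] at hj; simp only [Nat.mod_eq_of_lt hj])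
  rw [hc]
  have hr := foldl_range_cnt p answers 0 0
  simp only [Nat.zero_add] at hr
  rw [hr, Int.zero_add]

-- B's histogram loop is the Counter of the key list
lemma tally_eq (l : List Int) :
    pvTally l = PySem.Dict.counter ((PySem.List.enumerate l 0).map pvKey) := by
  rw [← PySem.Dict.foldl_insert_getD_add_one_eq_counter, List.foldl_map]
  rfl

-- a list-range sum with exactly one possibly-nonzero term
lemma sum_single (n m : Nat) (hm : m < n) (f : Nat → Int) (hf : ∀ r, r ≠ m → f r = 0) :
    ((List.range n).map f).sum = f m := by
  induction n with
  | zero => omega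
  | succ n ih =>
    rw [List.range_succ, List.map_append, List.sum_append]
    by_cases h : m = n
    · subst h
      have : ((List.range m).map f).sum = 0 := by
        apply List.sum_eq_zero
        intro x hx
        rw [List.mem_map] at hx
        obtain ⟨r, hr, rfl⟩ := hx
        rw [List.mem_range] at hr
        exact hf r (by omega)
      simp [this]
    · rw [ih (by omega)]
      simp [hf n (by omega)]

-- summed over one period of 40, the histogram counts are exactly cnt
lemma count_sum (p : List Int) (hdvd : p.length ∣ 40) :
    ∀ (l : List Int) (i0 : Nat),
      ((List.range 40).map (fun r =>
        ((List.count (((r : Nat) : Int), p.getD (r % p.length) 0)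
          ((PySem.List.enumerate l (i0 : Int)).map pvKey) : Nat) : Int))).sum = cnt p i0 l := by
  intro l
  induction l with
  | nil =>
    intro i0
    simp [cnt, PySem.List.enumerate_nil]
  | cons a t ih =>
    intro i0
    rw [PySem.List.enumerate_cons]
    have hkey : pvKey ((i0 : Int), a) = (((i0 % 40 : Nat) : Int), a) := by
      simp [pvKey]
    have hcount : ∀ (r : Nat),
        ((List.count (((r : Nat) : Int), p.getD (r % p.length) 0)
            (List.map pvKey (((i0 : Int), a) :: PySem.List.enumerate t ((i0 : Int) + 1))) : Nat) : Int)
        = ((List.count (((r : Nat) : Int), p.getD (r % p.length) 0)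
            (List.map pvKey (PySem.List.enumerate t ((i0 : Int) + 1))) : Nat) : Int)
          + (if r = i0 % 40 then (if p.getD (r % p.length) 0 = a then (1 : Int) else 0) else 0) := by
      intro r
      rw [List.map_cons, List.count_cons, hkey]
      simp only [beq_iff_eq, Prod.mk.injEq, Nat.cast_add]
      by_cases hr : r = i0 % 40
      · subst hr
        by_cases hpa : p.getD (i0 % 40 % p.length) 0 = a <;> simp [eq_comm]
      · simp only [hr, if_false]
        rw [if_neg (show ¬ ((((i0 % 40 : Nat)) : Int) = ((r : Nat) : Int) ∧ a = p.getD (r % p.length) 0)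
          from fun hc => hr (by have h1 := hc.1; omega))]
        simp
    simp only [hcount]
    rw [List.sum_map_add]
    have ht : ((i0 : Int) + 1) = ((i0 + 1 : Nat) : Int) := by push_cast; ring
    rw [ht, ih (i0 + 1)]
    have hone : ((List.range 40).map (fun r =>
        (if r = i0 % 40 then (if p.getD (r % p.length) 0 = a then (1 : Int) else 0) else 0))).sum
        = (if p.getD (i0 % p.length) 0 = a then (1 : Int) else 0) := by
      rw [sum_single 40 (i0 % 40) (Nat.mod_lt _ (by norm_num)) _ (by intro r hr; simp [hr])]
      rw [if_pos rfl, Nat.mod_mod_of_dvd i0 hdvd]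
    rw [hone]
    simp [cnt]
    ring

-- B's table scan for pattern p computes cnt p 0
lemma score_eq (p : List Int) (hdvd : p.length ∣ 40) (l : List Int) :
    pvScore (pvTally l) p = cnt p 0 l := by
  rw [tally_eq]
  unfold pvScore
  rw [PySem.List.pyRange_one]
  simp only [Int.sub_zero, show ((40 : Int)).toNat = 40 from rfl, List.foldl_map, Int.zero_add,
    PySem.List.len_eq, PySem.Int.mod_natCast, PySem.List.pyGetD_natCast,
    PySem.Dict.getD_counter]
  rw [PySem.List.foldl_add]
  have hcs := count_sum p hdvd l 0
  simp only [Nat.cast_zero] at hcs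
  rw [hcs]
  ring

-- ===== VERDICT (by name: the statement is the Claim_ definition above) =====
set_option maxHeartbeats 1000000 in
theorem solution_spec : Claim_equal_solution := by
  intro answers _
  unfold Spec_solution
  simp only [solution, solution_alt]
  rw [A_count [1, 2, 3, 4, 5] 5 (by norm_num) answers,
      A_count [2, 1, 2, 3, 2, 4, 2, 5] 8 (by norm_num) answers,
      A_count [3, 3, 1, 1, 2, 2, 4, 4, 5, 5] 10 (by norm_num) answers]
  have hmap : pvPatterns.map (pvScore (pvTally answers)) =
      [cnt [1, 2, 3, 4, 5] 0 answers, cnt [2, 1, 2, 3, 2, 4, 2, 5] 0 answers,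
       cnt [3, 3, 1, 1, 2, 2, 4, 4, 5, 5] 0 answers] := by
    simp only [pvPatterns, List.map_cons, List.map_nil]
    rw [score_eq _ (by norm_num) answers, score_eq _ (by norm_num) answers,
        score_eq _ (by norm_num) answers]
  rw [hmap]
  set s1 := cnt [1, 2, 3, 4, 5] 0 answers with hs1
  set s2 := cnt [2, 1, 2, 3, 2, 4, 2, 5] 0 answers with hs2
  set s3 := cnt [3, 3, 1, 1, 2, 2, 4, 4, 5, 5] 0 answers with hs3
  simp only [PySem.List.max?_id_cons, List.foldl_cons, List.foldl_nil, Option.getD_some,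
    show PySem.List.pyRange 0 3 1 = [0, 1, 2] from rfl]
  have g0 : PySem.List.pyGetD [s1, s2, s3] 0 0 = s1 := rfl
  have g1 : PySem.List.pyGetD [s1, s2, s3] 1 0 = s2 := rfl
  have g2 : PySem.List.pyGetD [s1, s2, s3] 2 0 = s3 := rfl
  simp only [g0, g1, g2, List.nil_append, max_def]
  split_ifs <;> first | rfl | omega
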